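-- pv_equiv track=rewrite | github.com/BenPali/LegacyProject | modernProject/lib/mutil.py | surnames_pieces
-- ===== SOURCE A (Python) =====
-- from typing import List, Callable, TypeVar
--
-- def surnames_pieces(surname: str) -> List[str]:
--     words = surname.split()
--     particles = {'saint', 'sainte'}
--     pieces = []
--     current_piece = []
--     for word in words:
--         word_lower = word.lower()
--         if len(word) >= 4 and word_lower not in particles:
--             if current_piece:
--                 pieces.append(' '.join(current_piece + [word]))
--                 current_piece = []
--             else:
--                 pieces.append(word)
--         else:
--             current_piece.append(word)
--     if current_piece:
--         if pieces:
--             pieces[-1] = pieces[-1] + ' ' + ' '.join(current_piece)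
--         else:
--             return []
--     return pieces if len(pieces) >= 2 else []
-- ===== SOURCE B (Python) =====
-- def surnames_pieces(surname):
--     words = surname.split()
--     gs = []   # groups collected right-to-left; each group's words in reversed order
--     tr = []   # trailing non-significant words (reversed)
--     for w in reversed(words):
--         wl = w.lower()
--         if len(w) >= 4 and wl != 'saint' and wl != 'sainte':
--             gs.append([w])
--         elif gs:
--             gs[-1].append(w)
--         else:
--             tr.append(w)
--     if len(gs) < 2:
--         return []
--     gs[0] = tr + gs[0]
--     return [' '.join(reversed(g)) for g in reversed(gs)]
-- ===== Notes on version B (the rewrite author's own statement) =====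
-- stated objective: alternative
-- what changed: A scans forward keeping a pending-words buffer, joining it into a string at each significant word and patching the last joined piece afterwards; B makes one right-to-left pass that collects the word groups themselves (trailing words folded into the last group by construction) and joins each group exactly once at the end.
import Mathlib
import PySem

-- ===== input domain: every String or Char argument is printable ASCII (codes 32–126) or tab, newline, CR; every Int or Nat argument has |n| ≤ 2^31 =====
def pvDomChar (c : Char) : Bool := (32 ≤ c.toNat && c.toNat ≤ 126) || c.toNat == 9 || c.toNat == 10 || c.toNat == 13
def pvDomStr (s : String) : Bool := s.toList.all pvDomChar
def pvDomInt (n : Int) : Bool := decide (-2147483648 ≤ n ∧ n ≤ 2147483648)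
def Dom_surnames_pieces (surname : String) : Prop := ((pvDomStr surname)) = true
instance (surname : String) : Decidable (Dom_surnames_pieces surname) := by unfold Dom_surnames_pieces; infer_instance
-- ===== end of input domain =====

-- B replaces A's forward accumulator loop (pending words merged into a joined piece at each
-- significant word, plus a post-hoc patch of the last piece) by a single right-to-left pass that
-- collects the word groups themselves and joins each group once at the end; objective: alternative.

-- ===== PORT A =====
-- loop body of A's 'for word in words' (state = (pieces, current_piece))
def pvStepA (st : List String × List String) (word : String) : List String × List String :=
  if 4 ≤ PySem.Str.len word ∧ ¬(PySem.Str.lower word = "saint" ∨ PySem.Str.lower word = "sainte") then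
    if st.2 ≠ [] then (st.1 ++ [PySem.Str.join " " (st.2 ++ [word])], [])
    else (st.1 ++ [word], [])
  else (st.1, st.2 ++ [word])

-- A's code after the loop
def pvFinishA (st : List String × List String) : List String :=
  if st.2 ≠ [] then
    if st.1 ≠ [] then
      let pieces := st.1.dropLast ++ [st.1.getLast! ++ " " ++ PySem.Str.join " " st.2]
      if 2 ≤ pieces.length then pieces else []
    else []
  else if 2 ≤ st.1.length then st.1 else []

def surnames_pieces (surname : String) : List String :=
  pvFinishA ((PySem.Str.split₀ surname).foldl pvStepA ([], []))

-- ===== PORT B =====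
-- loop body of B's 'for w in reversed(words)' (state = (gs, tr): groups right-to-left, each group reversed)
def pvStepB (st : List (List String) × List String) (w : String) : List (List String) × List String :=
  if 4 ≤ PySem.Str.len w ∧ ¬(PySem.Str.lower w = "saint" ∨ PySem.Str.lower w = "sainte") then
    (st.1 ++ [[w]], st.2)
  else if st.1 ≠ [] then
    (st.1.dropLast ++ [st.1.getLast! ++ [w]], st.2)
  else (st.1, st.2 ++ [w])

-- B's code after the loop
def pvFinishB (st : List (List String) × List String) : List String :=
  if st.1.length < 2 then []
  else
    let gs := st.1.modifyHead (fun g => st.2 ++ g)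
    gs.reverse.map (fun g => PySem.Str.join " " g.reverse)

def surnames_pieces_alt (surname : String) : List String :=
  pvFinishB ((PySem.Str.split₀ surname).reverse.foldl pvStepB ([], []))

-- ===== PRECONDITION & SPEC =====
def Spec_surnames_pieces (surname : String) (out : List String) : Prop := out = surnames_pieces_alt surname
instance (surname : String) (out : List String) : Decidable (Spec_surnames_pieces surname out) := by unfold Spec_surnames_pieces; infer_instance

-- ===== CLAIM (what is proved, stated in full; the proofs are below) =====
def Claim_equal_surnames_pieces : Prop := ∀ (surname : String), Dom_surnames_pieces surname → Spec_surnames_pieces surname (surnames_pieces surname)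

-- ===== LEMMAS AND PROOFS =====

def pvJ (ws : List String) : String := PySem.Str.join " " ws

-- the common abstraction both programs compute: the list of word groups (each group ends at its
-- significant word; forward order) and the trailing non-significant words
def pvGroups (ws : List String) : List (List String) × List String :=
  match ws with
  | [] => ([], [])
  | w :: ws =>
    let r := pvGroups ws
    if 4 ≤ PySem.Str.len w ∧ ¬(PySem.Str.lower w = "saint" ∨ PySem.Str.lower w = "sainte") then
      ([w] :: r.1, r.2)
    else
      match r with
      | ([], tr) => ([], w :: tr)
      | (g :: gs, tr) => ((w :: g) :: gs, tr)

def pvAssemble (pstr : List (List String) × List String) : List String :=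
  if pstr.1.length < 2 then []
  else (pstr.1.dropLast ++ [pstr.1.getLast! ++ pstr.2]).map pvJ

lemma pvJ_cons_cons (w r : String) (rest : List String) :
    pvJ (w :: r :: rest) = w ++ " " ++ pvJ (r :: rest) := by
  simp only [pvJ, PySem.Str.join, List.map_cons, PySem.Chars.join_cons_cons,
    String.ofList_append, String.ofList_toList]
lemma pvJ_singleton (w : String) : pvJ [w] = w := by
  simp [pvJ, PySem.Str.join, PySem.Chars.join_singleton]
lemma pvJ_append (a b : List String) (ha : a ≠ []) (hb : b ≠ []) :
    pvJ (a ++ b) = pvJ a ++ " " ++ pvJ b := by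
  induction a with
  | nil => exact absurd rfl ha
  | cons x a ih =>
    cases a with
    | nil =>
      cases b with
      | nil => exact absurd rfl hb
      | cons y ys => simp [pvJ_cons_cons, pvJ_singleton]
    | cons z zs =>
      have h := ih (by simp)
      simp only [List.cons_append] at h ⊢
      rw [pvJ_cons_cons x z (zs ++ b), h, pvJ_cons_cons x z zs]
      simp [String.append_assoc]

lemma pvGroups_ne_nil (ws : List String) : ∀ g ∈ (pvGroups ws).1, g ≠ [] := by
  induction ws with
  | nil => simp [pvGroups]
  | cons w ws ih =>
    intro g hg
    simp only [pvGroups] at hg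
    split at hg
    · simp only [List.mem_cons] at hg
      rcases hg with h | h
      · simp [h]
      · exact ih g h
    · rcases hr : pvGroups ws with ⟨ps, tr⟩
      rw [hr] at hg
      cases ps with
      | nil => simp at hg
      | cons g0 gs =>
        simp only [List.mem_cons] at hg
        rcases hg with h | h
        · simp [h]
        · exact ih g (by rw [hr]; exact List.mem_cons_of_mem _ h)

lemma pvFoldA (ws : List String) : ∀ P C,
    ws.foldl pvStepA (P, C) =
      match pvGroups ws with
      | ([], tr) => (P, C ++ tr)
      | (g :: gs, tr) => (P ++ ((C ++ g) :: gs).map pvJ, tr) := by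
  induction ws with
  | nil => intro P C; simp [pvGroups]
  | cons w ws ih =>
    intro P C
    rw [List.foldl_cons]
    by_cases hsig : 4 ≤ PySem.Str.len w ∧ ¬(PySem.Str.lower w = "saint" ∨ PySem.Str.lower w = "sainte")
    · have hstep : pvStepA (P, C) w = (P ++ [pvJ (C ++ [w])], []) := by
        simp only [pvStepA]
        rw [if_pos hsig]
        by_cases hC : C = []
        · subst hC; simp [pvJ_singleton]
        · simp [hC, pvJ]
      rw [hstep, ih]
      rcases hr : pvGroups ws with ⟨ps, tr⟩
      simp only [pvGroups, hr, if_pos hsig]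
      cases ps with
      | nil => simp
      | cons g gs => simp
    · have hstep : pvStepA (P, C) w = (P, C ++ [w]) := by
        simp only [pvStepA]
        rw [if_neg hsig]
      rw [hstep, ih]
      rcases hr : pvGroups ws with ⟨ps, tr⟩
      simp only [pvGroups, hr, if_neg hsig]
      cases ps with
      | nil => simp
      | cons g gs => simp

lemma pv_getLast!_concat {α : Type} [Inhabited α] (l : List α) (x : α) :
    (l ++ [x]).getLast! = x := by
  induction l with
  | nil => rfl
  | cons a l ih =>
    cases h : l ++ [x] with
    | nil => simp at h
    | cons b t => simp [List.getLast!] at *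

lemma pvFoldB (ws : List String) :
    ws.reverse.foldl pvStepB ([], []) =
      (((pvGroups ws).1.map List.reverse).reverse, (pvGroups ws).2.reverse) := by
  rw [List.foldl_reverse]
  induction ws with
  | nil => simp [pvGroups]
  | cons w ws ih =>
    rw [List.foldr_cons, ih]
    by_cases hsig : 4 ≤ PySem.Str.len w ∧ ¬(PySem.Str.lower w = "saint" ∨ PySem.Str.lower w = "sainte")
    · simp only [pvStepB]
      rw [if_pos hsig]
      simp only [pvGroups, if_pos hsig]
      simp
    · rcases hr : pvGroups ws with ⟨ps, tr⟩
      simp only [pvGroups, hr, if_neg hsig]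
      simp only [pvStepB]
      rw [if_neg hsig]
      cases ps with
      | nil => simp
      | cons g gs =>
        have hne : ((g :: gs).map List.reverse).reverse ≠ [] := by simp
        rw [if_pos (by simp)]
        simp only
        have hdec : ((g :: gs).map List.reverse).reverse
            = ((gs.map List.reverse).reverse) ++ [g.reverse] := by simp
        rw [hdec]
        simp

lemma pvFinishA_assemble (ps : List (List String)) (tr : List String)
    (hne : ∀ g ∈ ps, g ≠ []) :
    pvFinishA (ps.map pvJ, tr) = pvAssemble (ps, tr) := by
  rcases List.eq_nil_or_concat ps with hps | ⟨d, x, hps⟩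
  · subst hps
    by_cases htr : tr = [] <;> simp [pvFinishA, pvAssemble, htr]
  · rw [List.concat_eq_append] at hps
    subst hps
    have hxne : x ≠ [] := hne x (by simp)
    by_cases htr : tr = []
    · subst htr
      simp only [pvFinishA, pvAssemble, List.map_append, List.map_cons, List.map_nil,
        List.append_nil]
      rw [if_neg (by simp : ¬ (([]:List String) ≠ []))]
      rw [List.dropLast_concat, pv_getLast!_concat]
      split_ifs <;>
        first
        | rfl
        | (exfalso
           simp only [List.length_append, List.length_map, List.length_cons,
             List.length_nil, not_le, not_lt] at *
           omega)
    · simp only [pvFinishA, pvAssemble, List.map_append, List.map_cons, List.map_nil]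
      rw [if_pos (by simp [htr] : (tr ≠ [])), if_pos (by simp : (List.map pvJ d ++ [pvJ x] ≠ []))]
      rw [List.dropLast_concat, pv_getLast!_concat, List.dropLast_concat, pv_getLast!_concat]
      have hj : pvJ x ++ " " ++ PySem.Str.join " " tr = pvJ (x ++ tr) := by
        rw [pvJ_append x tr hxne htr]; rfl
      rw [hj]
      split_ifs <;>
        first
        | rfl
        | (exfalso
           simp only [List.length_append, List.length_map, List.length_cons,
             List.length_nil, not_le, not_lt] at *
           omega)

lemma pvFinishB_assemble (ps : List (List String)) (tr : List String) :
    pvFinishB ((ps.map List.reverse).reverse, tr.reverse) = pvAssemble (ps, tr) := by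
  rcases List.eq_nil_or_concat ps with hps | ⟨d, x, hps⟩
  · subst hps
    simp [pvFinishB, pvAssemble]
  · rw [List.concat_eq_append] at hps
    subst hps
    simp only [pvFinishB, pvAssemble, List.map_append, List.map_cons, List.map_nil,
      List.reverse_append, List.reverse_cons, List.reverse_nil, List.nil_append,
      List.cons_append, List.length_cons, List.length_reverse, List.length_map,
      List.length_append]
    rw [List.dropLast_concat, pv_getLast!_concat]
    split_ifs with h1 h2 <;>
      first
      | rfl
      | (exfalso
         simp only [List.length_append, List.length_map, List.length_cons,
           List.length_nil, not_le, not_lt] at *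
         omega)
      | skip
    · simp only [List.modifyHead_cons, List.reverse_cons, List.reverse_append,
        List.reverse_reverse, List.map_append, List.map_cons, List.map_map, List.map_nil]
      simp [Function.comp_def, pvJ]

lemma pvA_eq (s : String) :
    surnames_pieces s = pvAssemble (pvGroups (PySem.Str.split₀ s)) := by
  unfold surnames_pieces
  rw [pvFoldA]
  have hne := pvGroups_ne_nil (PySem.Str.split₀ s)
  rcases hr : pvGroups (PySem.Str.split₀ s) with ⟨ps, tr⟩
  rw [hr] at hne
  cases ps with
  | nil =>
    simp only
    rw [show ((([]:List String), ([]:List String) ++ tr)) = (List.map pvJ [], tr) by simp]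
    exact pvFinishA_assemble [] tr hne
  | cons g gs =>
    simp only [List.nil_append]
    exact pvFinishA_assemble (g :: gs) tr hne

lemma pvB_eq (s : String) :
    surnames_pieces_alt s = pvAssemble (pvGroups (PySem.Str.split₀ s)) := by
  unfold surnames_pieces_alt
  rw [pvFoldB]
  exact pvFinishB_assemble (pvGroups (PySem.Str.split₀ s)).1 (pvGroups (PySem.Str.split₀ s)).2

-- ===== VERDICT (by name: the statement is the Claim_ definition above) =====
theorem surnames_pieces_spec : Claim_equal_surnames_pieces := by
  intro s _
  unfold Spec_surnames_pieces
  rw [pvA_eq, pvB_eq]
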